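-- pv_equiv track=rewrite | github.com/OZmasterAI/Torus-Framework | hooks/subagent_context.py | _format_skill_usage
-- ===== SOURCE A (Python) =====
-- def _format_skill_usage(session_state):
--     """Format recent skill usage: 'Recent skills: commit, build, deep-dive'."""
--     skills = session_state.get("recent_skills", [])
--     if not skills:
--         return ""
--     # Deduplicate while preserving order (most recent last)
--     seen = set()
--     unique = []
--     for s in reversed(skills):
--         if s not in seen:
--             seen.add(s)
--             unique.append(s)
--     unique.reverse()
--     # Take last 5 (most recent)
--     max_skills = 5
--     if len(unique) > max_skills:
--         shown = unique[-max_skills:]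
--         extra = len(unique) - max_skills
--         return "Recent skills: " + ", ".join(shown) + f" +{extra} more."
--     return "Recent skills: " + ", ".join(unique) + "."
-- ===== SOURCE B (Python) =====
-- def _format_skill_usage(session_state):
--     """Format recent skill usage: 'Recent skills: commit, build, deep-dive'."""
--     skills = session_state.get("recent_skills", [])
--     if not skills:
--         return ""
--     # Keep each skill at its LAST occurrence: keep skills[i] iff it never reappears later.
--     unique = [s for i, s in enumerate(skills) if s not in skills[i + 1:]]
--     shown = unique[-5:]
--     extra = len(unique) - 5
--     suffix = f" +{extra} more." if extra > 0 else "."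
--     return "Recent skills: " + ", ".join(shown) + suffix
-- ===== Notes on version B (the rewrite author's own statement) =====
-- stated objective: alternative
-- what changed: Replaces the reversed-iteration set-accumulator dedup plus double reverse by a single forward comprehension over enumerate that keeps skills[i] iff it does not reappear in skills[i+1:], and folds the two return branches of the formatting tail into one slice + conditional suffix.
import Mathlib
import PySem

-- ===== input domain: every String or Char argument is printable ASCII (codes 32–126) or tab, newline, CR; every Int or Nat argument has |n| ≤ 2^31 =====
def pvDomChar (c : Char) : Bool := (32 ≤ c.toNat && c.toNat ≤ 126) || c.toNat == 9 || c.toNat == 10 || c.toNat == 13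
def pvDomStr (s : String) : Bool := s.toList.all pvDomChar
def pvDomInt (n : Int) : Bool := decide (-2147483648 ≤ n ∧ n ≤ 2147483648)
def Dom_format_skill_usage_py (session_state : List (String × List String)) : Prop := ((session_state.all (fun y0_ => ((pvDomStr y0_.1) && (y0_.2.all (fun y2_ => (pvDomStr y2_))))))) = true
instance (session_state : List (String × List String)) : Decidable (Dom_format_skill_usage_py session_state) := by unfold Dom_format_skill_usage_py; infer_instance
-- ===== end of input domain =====

-- B replaces A's reversed set-accumulator dedup + double reverse by a forward comprehension
-- keeping skills[i] iff it does not reappear in skills[i+1:] (objective: alternative, no speed claim).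

-- ===== PORT A =====
def format_skill_usage_py (session_state : List (String × List String)) : String :=
  let skills := PySem.Dict.getD (PySem.Dict.mk session_state) "recent_skills" []
  if skills = [] then ""
  else
    -- for s in reversed(skills): if s not in seen: seen.add(s); unique.append(s)
    let st := skills.reverse.foldl
      (fun (acc : PySem.Set String × List String) s =>
        if PySem.Set.contains acc.1 s then acc
        else (PySem.Set.add acc.1 s, acc.2 ++ [s]))
      (PySem.Set.empty, [])
    let unique := st.2.reverse
    if 5 < unique.length then
      let shown := PySem.List.slice unique (some (-5)) none
      let extra : Int := (unique.length : Int) - 5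
      "Recent skills: " ++ PySem.Str.join ", " shown ++ " +" ++ PySem.Int.toStr extra ++ " more."
    else
      "Recent skills: " ++ PySem.Str.join ", " unique ++ "."

-- ===== PORT B =====
def format_skill_usage_py_alt (session_state : List (String × List String)) : String :=
  let skills := PySem.Dict.getD (PySem.Dict.mk session_state) "recent_skills" []
  if skills = [] then ""
  else
    -- unique = [s for i, s in enumerate(skills) if s not in skills[i+1:]]
    let unique := (PySem.List.enumerate skills 0).filterMap
      (fun p => if p.2 ∈ PySem.List.slice skills (some (p.1 + 1)) none then none else some p.2)
    let shown := PySem.List.slice unique (some (-5)) none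
    let extra : Int := (unique.length : Int) - 5
    let suffix := if 0 < extra then " +" ++ PySem.Int.toStr extra ++ " more." else "."
    "Recent skills: " ++ PySem.Str.join ", " shown ++ suffix

-- ===== PRECONDITION & SPEC =====
def Spec_format_skill_usage_py (session_state : List (String × List String)) (out : String) : Prop := out = format_skill_usage_py_alt session_state
instance (session_state : List (String × List String)) (out : String) : Decidable (Spec_format_skill_usage_py session_state out) := by unfold Spec_format_skill_usage_py; infer_instance

-- ===== CLAIM (what is proved, stated in full; the proofs are below) =====
def Claim_equal_format_skill_usage_py : Prop := ∀ (session_state : List (String × List String)), Dom_format_skill_usage_py session_state → Spec_format_skill_usage_py session_state (format_skill_usage_py session_state)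

-- ===== LEMMAS AND PROOFS =====

-- the common value of both dedup passes: keep each element at its LAST occurrence
def keepLast : List String → List String
  | [] => []
  | s :: t => if s ∈ t then keepLast t else s :: keepLast t

-- A-side: the seen/unique fold, accumulator pulled out
theorem foldA_acc (l : List String) (seen : PySem.Set String) (acc : List String) :
    (l.foldl (fun (acc : PySem.Set String × List String) s =>
        if PySem.Set.contains acc.1 s then acc
        else (PySem.Set.add acc.1 s, acc.2 ++ [s])) (seen, acc)).2
      = acc ++ (l.foldl (fun (acc : PySem.Set String × List String) s =>
        if PySem.Set.contains acc.1 s then acc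
        else (PySem.Set.add acc.1 s, acc.2 ++ [s])) (seen, [])).2 := by
  induction l generalizing seen acc with
  | nil => simp
  | cons a t ih =>
    simp only [List.foldl_cons]
    by_cases h : PySem.Set.contains seen a
    · rw [if_pos h, if_pos h, ih seen acc]
    · rw [if_neg h, if_neg h]
      simp only [List.nil_append]
      rw [ih (PySem.Set.add seen a) (acc ++ [a]), ih (PySem.Set.add seen a) [a],
        List.append_assoc]

-- first-occurrence dedup of l relative to an already-seen set
def firstDedup : List String → PySem.Set String → List String
  | [], _ => []
  | s :: t, seen =>
      if PySem.Set.contains seen s then firstDedup t seen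
      else s :: firstDedup t (PySem.Set.add seen s)

theorem foldA_eq_firstDedup (l : List String) (seen : PySem.Set String) :
    (l.foldl (fun (acc : PySem.Set String × List String) s =>
        if PySem.Set.contains acc.1 s then acc
        else (PySem.Set.add acc.1 s, acc.2 ++ [s])) (seen, [])).2 = firstDedup l seen := by
  induction l generalizing seen with
  | nil => rfl
  | cons a t ih =>
    simp only [List.foldl_cons, firstDedup]
    by_cases h : PySem.Set.contains seen a
    · rw [if_pos h, if_pos h, ih]
    · rw [if_neg h, if_neg h, foldA_acc, ih]
      simp

theorem firstDedup_append_singleton (m : List String) (s : String) (seen : PySem.Set String) :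
    firstDedup (m ++ [s]) seen
      = firstDedup m seen ++ (if PySem.Set.contains seen s = true ∨ s ∈ m then [] else [s]) := by
  induction m generalizing seen with
  | nil => simp [firstDedup]
  | cons a t ih =>
    simp only [List.cons_append, firstDedup]
    by_cases h : PySem.Set.contains seen a
    · rw [if_pos h, if_pos h, ih]
      have hiff : (PySem.Set.contains seen s = true ∨ s ∈ t) ↔
          (PySem.Set.contains seen s = true ∨ s ∈ a :: t) := by
        simp only [List.mem_cons]
        constructor
        · tauto
        · rintro (h2 | hs | h3)
          · tauto
          · subst hs; exact Or.inl h
          · tauto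
      rw [if_congr hiff rfl rfl]
    · rw [if_neg h, if_neg h, ih, List.cons_append]
      have hadd : (PySem.Set.contains (PySem.Set.add seen a) s = true) ↔
          (PySem.Set.contains seen s = true ∨ s = a) := by
        simp [PySem.Set.contains_iff, PySem.Set.mem_add]
      have hiff : (PySem.Set.contains (PySem.Set.add seen a) s = true ∨ s ∈ t) ↔
          (PySem.Set.contains seen s = true ∨ s ∈ a :: t) := by
        rw [hadd]
        simp only [List.mem_cons]
        tauto
      rw [if_congr hiff rfl rfl]

theorem uniqueA_eq_keepLast (l : List String) :
    (firstDedup l.reverse PySem.Set.empty).reverse = keepLast l := by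
  induction l with
  | nil => rfl
  | cons s t ih =>
    rw [List.reverse_cons, firstDedup_append_singleton, keepLast]
    have hcond : (PySem.Set.contains PySem.Set.empty s = true ∨ s ∈ t.reverse) ↔ s ∈ t := by
      simp [PySem.Set.contains_iff, PySem.Set.empty]
    by_cases h : s ∈ t
    · rw [if_pos (hcond.mpr h), if_pos h, List.append_nil, ih]
    · rw [if_neg (fun hc => h (hcond.mp hc)), if_neg h, List.reverse_append, ← ih]
      rfl

-- B-side: the enumerate/filterMap comprehension computes keepLast
theorem filterB_eq_keepLast (t : List String) (L : List String) (s : Nat) (hL : L.drop s = t) :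
    (PySem.List.enumerate t (s : Int)).filterMap
      (fun p => if p.2 ∈ PySem.List.slice L (some (p.1 + 1)) none then none else some p.2)
      = keepLast t := by
  induction t generalizing s L with
  | nil => simp [PySem.List.enumerate_nil, keepLast]
  | cons a t' ih =>
    rw [PySem.List.enumerate_cons, List.filterMap_cons, keepLast]
    have hdrop : L.drop (s + 1) = t' := by
      have h1 : (L.drop s).drop 1 = t' := by rw [hL]; rfl
      rw [List.drop_drop] at h1
      exact h1
    have hslice : PySem.List.slice L (some ((s : Int) + 1)) none = t' := by
      rw [show ((s : Int) + 1) = ((s + 1 : Nat) : Int) by push_cast; ring,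
        PySem.List.slice_from_natCast, hdrop]
    have hcast : ((s : Int) + 1) = ((s + 1 : Nat) : Int) := by push_cast; ring
    by_cases h : a ∈ t'
    · rw [if_pos h]
      simp only [hslice, h, if_pos]
      rw [hcast, ih L (s + 1) hdrop]
    · rw [if_neg h]
      simp only [hslice, h, if_neg]
      rw [hcast, ih L (s + 1) hdrop]
      simp [h]

-- the shared formatting tail agrees once the deduplicated lists agree
theorem tail_eq (u : List String) :
    (if 5 < u.length then
        "Recent skills: " ++ PySem.Str.join ", " (PySem.List.slice u (some (-5)) none) ++ " +"
          ++ PySem.Int.toStr ((u.length : Int) - 5) ++ " more."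
      else "Recent skills: " ++ PySem.Str.join ", " u ++ ".")
    = "Recent skills: " ++ PySem.Str.join ", " (PySem.List.slice u (some (-5)) none)
        ++ (if 0 < (u.length : Int) - 5 then " +" ++ PySem.Int.toStr ((u.length : Int) - 5) ++ " more." else ".") := by
  by_cases h : 5 < u.length
  · rw [if_pos h, if_pos (by omega)]
    simp [String.append_assoc]
  · rw [if_neg h, if_neg (by omega)]
    have h5 : (0 : Nat) < 5 := by omega
    have : PySem.List.slice u (some (-5)) none = u := by
      rw [show ((-5 : Int)) = -((5 : Nat) : Int) by norm_num,
        PySem.List.slice_from_neg_natCast u 5 h5]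
      have : u.length - 5 = 0 := by omega
      simp [this]
    rw [this]

-- ===== VERDICT (by name: the statement is the Claim_ definition above) =====
theorem format_skill_usage_py_spec : Claim_equal_format_skill_usage_py := by
  intro session_state _
  unfold Spec_format_skill_usage_py format_skill_usage_py format_skill_usage_py_alt
  by_cases h : PySem.Dict.getD (PySem.Dict.mk session_state) "recent_skills" ([] : List String) = []
  · simp [h]
  · simp only [h, if_neg, ite_false]
    rw [foldA_eq_firstDedup, uniqueA_eq_keepLast,
      show ((0 : Int)) = ((0 : Nat) : Int) by norm_num,
      filterB_eq_keepLast _ _ 0 (by simp)]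
    exact tail_eq _
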